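-- pv_equiv track=rewrite | github.com/kxz167/csds444-final-project | ui/cryptography/algos/AES/AES.py | two_power
-- ===== SOURCE A (Python) =====
-- def byte(x, n=8):
--     return format(x, f"0{n}b")
--
-- def mul(a, b):
--     # this method for galois field of order 2^8 multiplication is not mine, abstract algebra is hard
--     # credit to https://medium.com/wearesinch/building-aes-128-from-the-ground-up-with-python-8122af44ebf9
--     tmp = 0
--     b_byte = bin(b)[2:]
--     for i in range(len(b_byte)):
--         tmp = tmp ^ (int(b_byte[-(i + 1)]) * (a << i))
--
--     mod = int("100011011", 2)
--     exp = len(bin(tmp)[2:])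
--     diff = exp - len(bin(mod)[2:]) + 1
--
--     for i in range(diff):
--         if byte(tmp, exp)[i] == "1":
--             tmp = tmp ^ (mod << diff - i - 1)
--     return tmp
--
-- def two_power(value):
--     c = 0x01
--     if value == 0:
--         return 0
--     while value != 1:
--         c = mul(c, 2)
--         value -= 1
--     return c
-- ===== SOURCE B (Python) =====
-- # Precomputed antilog table: doubling by 2 in GF(2^8) with the AES polynomial
-- # 0x11b cycles with period 51 starting from 1, so two_power is a table lookup.
-- _ANTILOG = [
--     1, 2, 4, 8, 16, 32, 64, 128, 27, 54, 108, 216, 171, 77, 154, 47, 94,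
--     188, 99, 198, 151, 53, 106, 212, 179, 125, 250, 239, 197, 145, 57, 114,
--     228, 211, 189, 97, 194, 159, 37, 74, 148, 51, 102, 204, 131, 29, 58,
--     116, 232, 203, 141,
-- ]
--
-- def two_power(value):
--     if value == 0:
--         return 0
--     return _ANTILOG[(value - 1) % 51]
-- ===== Notes on version B (the rewrite author's own statement) =====
-- stated objective: faster
-- what changed: Replaces the value-1 repeated GF(2^8) doublings (each doing bit-string arithmetic) by a single lookup in a precomputed 51-entry antilog table indexed by (value-1) mod 51, since doubling by x mod 0x11b has multiplicative order 51.
import Mathlib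
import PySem

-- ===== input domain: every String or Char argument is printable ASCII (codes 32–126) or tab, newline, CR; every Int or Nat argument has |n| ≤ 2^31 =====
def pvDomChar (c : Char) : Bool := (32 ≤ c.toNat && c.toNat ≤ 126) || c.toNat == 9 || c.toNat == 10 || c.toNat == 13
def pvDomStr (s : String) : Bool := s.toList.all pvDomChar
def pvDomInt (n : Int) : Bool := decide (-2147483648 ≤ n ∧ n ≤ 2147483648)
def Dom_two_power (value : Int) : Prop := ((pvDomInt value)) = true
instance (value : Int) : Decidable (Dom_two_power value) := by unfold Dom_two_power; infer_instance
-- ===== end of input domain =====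

-- B replaces A's value-1 repeated GF(2^8) doublings by one lookup in a precomputed
-- 51-entry antilog table indexed by (value-1) mod 51 (objective: faster, O(1) vs O(value)).

-- ===== PORT A =====

-- Python bin(x)[2:] for x ≥ 0, MSB first (binStrA 0 = "0", matching bin(0)[2:] = "0").
-- (structural recursion on a fuel argument so the kernel can evaluate it; fuel n always suffices)
def bitsA : Nat → Nat → List Char
  | _, 0 => []
  | 0, _ + 1 => []
  | f + 1, n + 1 => bitsA f ((n + 1) / 2) ++ [if (n + 1) % 2 == 1 then '1' else '0']

def binStrA (x : Int) : List Char :=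
  if x == 0 then ['0'] else bitsA x.toNat x.toNat

-- Python byte(x, n) = format(x, f"0{n}b") for x ≥ 0: binary digits left-padded with '0' to width n.
def byteA (x : Int) (n : Nat) : List Char :=
  List.replicate (n - (binStrA x).length) '0' ++ binStrA x

-- first loop of mul: tmp = tmp ^ (int(b_byte[-(i+1)]) * (a << i))  (a << i ported as a * 2^i, exact)
def mulLoop1A (a : Int) (bbyte : List Char) (i : Nat) (tmp : Int) : Int :=
  match i with
  | 0 => tmp
  | i + 1 =>
      let tmp := mulLoop1A a bbyte i tmp
      Int.xor tmp ((if bbyte.getD (bbyte.length - 1 - i) '0' == '1' then 1 else 0) * (a * 2 ^ i))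

-- second loop of mul: for i in range(diff): if byte(tmp, exp)[i] == "1": tmp ^= mod << (diff - i - 1)
def mulLoop2A (md : Int) (expn : Nat) (diff : Nat) : Nat → Int → Int
  | 0, tmp => tmp
  | i + 1, tmp =>
      let tmp := mulLoop2A md expn diff i tmp
      if (byteA tmp expn).getD i ' ' == '1' then Int.xor tmp (md * 2 ^ (diff - i - 1)) else tmp

def mulA (a b : Int) : Int :=
  let bbyte := binStrA b
  let tmp := mulLoop1A a bbyte bbyte.length 0
  let md : Int := 283     -- int("100011011", 2)
  let expn := (binStrA tmp).length
  let diff : Int := (expn : Int) - (binStrA md).length + 1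
  mulLoop2A md expn diff.toNat diff.toNat tmp   -- range(diff) is empty when diff ≤ 0

-- while value != 1: c = mul(c, 2); value -= 1   — fuel value.toNat suffices exactly when value ≥ 1 (Pre_)
def twoLoopA : Nat → Int → Int → Int
  | 0, c, _ => c
  | f + 1, c, v => if v == 1 then c else twoLoopA f (mulA c 2) (v - 1)

def two_power (value : Int) : Int :=
  if value == 0 then 0 else twoLoopA value.toNat 1 value

-- ===== PORT B =====

def antilogB : List Int :=
  [1, 2, 4, 8, 16, 32, 64, 128, 27, 54, 108, 216, 171, 77, 154, 47, 94,
   188, 99, 198, 151, 53, 106, 212, 179, 125, 250, 239, 197, 145, 57, 114,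
   228, 211, 189, 97, 194, 159, 37, 74, 148, 51, 102, 204, 131, 29, 58,
   116, 232, 203, 141]

def two_power_alt (value : Int) : Int :=
  if value == 0 then 0
  else (PySem.List.pyGet? antilogB (PySem.Int.mod (value - 1) 51)).getD 0
  -- index (value-1) % 51 is always in range, so the .getD 0 default is never used

-- ===== PRECONDITION & SPEC =====
-- Pre_ excludes value < 0, on which Python A's 'while value != 1: value -= 1' never terminates.
def Pre_two_power (value : Int) : Prop := 0 ≤ value
instance (value : Int) : Decidable (Pre_two_power value) := by unfold Pre_two_power; infer_instance
def pvWitness_two_power : Int := 7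

def Spec_two_power (value : Int) (out : Int) : Prop := out = two_power_alt value
instance (value : Int) (out : Int) : Decidable (Spec_two_power value out) := by unfold Spec_two_power; infer_instance

-- ===== CLAIM (what is proved, stated in full; the proofs are below) =====
def Claim_equal_two_power : Prop := ∀ (value : Int), Dom_two_power value → Pre_two_power value → Spec_two_power value (two_power value)

-- ===== LEMMAS AND PROOFS =====

def stepA (c : Int) : Int := mulA c 2

theorem twoLoopA_eq_iterate : ∀ (n : Nat) (c : Int), twoLoopA (n + 1) c ((n : Int) + 1) = stepA^[n] c := by
  intro n
  induction n with
  | zero => intro c; simp [twoLoopA]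
  | succ n ih =>
      intro c
      have hne : ((((n : Int) + 1) + 1) == 1) = false := by
        simp; omega
      have harg : ((n : Int) + 1 + 1) - 1 = (n : Int) + 1 := by ring
      conv_lhs => rw [twoLoopA]
      rw [Nat.cast_succ, hne]
      simp only [Bool.false_eq_true, if_false, harg]
      rw [ih (mulA c 2), show mulA c 2 = stepA c from rfl, ← Function.iterate_succ_apply]

set_option maxRecDepth 40000 in
theorem stepA_period : stepA^[51] 1 = 1 := by decide

theorem iterate_mod (k : Nat) : stepA^[k] 1 = stepA^[k % 51] 1 := by
  induction k using Nat.strong_induction_on with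
  | _ k ih =>
    by_cases h : k < 51
    · rw [Nat.mod_eq_of_lt h]
    · have hk : k = (k - 51) + 51 := by omega
      rw [hk, Function.iterate_add_apply, stepA_period, ih (k - 51) (by omega),
        Nat.add_mod_right]

set_option maxRecDepth 40000 in
theorem antilog_eq : ∀ r : Fin 51, (PySem.List.pyGet? antilogB ((r : Nat) : Int)).getD 0 = stepA^[(r : Nat)] 1 := by
  decide

theorem two_power_spec' (value : Int) (h : 0 ≤ value) : two_power value = two_power_alt value := by
  by_cases h0 : value = 0
  · simp [two_power, two_power_alt, h0]
  · have h1 : 1 ≤ value := by omega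
    obtain ⟨n, hn⟩ : ∃ n : Nat, value = (n : Int) + 1 := ⟨(value - 1).toNat, by omega⟩
    have hA : two_power value = stepA^[n] 1 := by
      have hvt : value.toNat = n + 1 := by omega
      rw [two_power, if_neg (by simpa using h0), hvt, hn, twoLoopA_eq_iterate]
    have hmod : PySem.Int.mod (value - 1) 51 = ((n % 51 : Nat) : Int) := by
      have : value - 1 = ((n : Nat) : Int) := by omega
      rw [this]
      exact_mod_cast PySem.Int.mod_natCast n 51
    have hB : two_power_alt value = stepA^[n % 51] 1 := by
      rw [two_power_alt, if_neg (by simpa using h0), hmod]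
      exact antilog_eq ⟨n % 51, Nat.mod_lt _ (by omega)⟩
    rw [hA, hB, iterate_mod]

-- ===== VERDICT (by name: the statement is the Claim_ definition above) =====
theorem two_power_spec : Claim_equal_two_power := by
  intro value _ hpre
  exact two_power_spec' value hpre
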